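-- pv_equiv track=rewrite | github.com/mozartbob21/dashboard_unified | app.py | calculate_overdue_metrics
-- ===== SOURCE A (Python) =====
-- def to_int(value, default=0):
--     try:
--         if value is None:
--             return default
--         if isinstance(value, str):
--             value = value.strip().replace(" ", "").replace("\u00A0", "").replace(",", ".")
--             if not value:
--                 return default
--         return int(float(value))
--     except Exception:
--         return default
--
-- def calculate_overdue_metrics(raw_result):
--     if not raw_result:
--         return {
--             "total": 0,
--             "critical": 0,
--             "risk": 0,
--             "ok": 0,
--         }
--
--     items = raw_result.get("items", []) or []
--
--     total = len(items)
--     critical = len([x for x in items if to_int(x.get("overdue_count", 0)) >= 20])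
--     risk = len([x for x in items if 1 <= to_int(x.get("overdue_count", 0)) < 20])
--     ok = len([x for x in items if to_int(x.get("overdue_count", 0)) <= 0])
--
--     return {
--         "total": total,
--         "critical": critical,
--         "risk": risk,
--         "ok": ok,
--     }
-- ===== SOURCE B (Python) =====
-- def to_int(value, default=0):
--     try:
--         if value is None:
--             return default
--         if isinstance(value, str):
--             value = value.strip().replace(" ", "").replace("\u00A0", "").replace(",", ".")
--             if not value:
--                 return default
--         return int(float(value))
--     except Exception:
--         return default
--
-- def calculate_overdue_metrics(raw_result):
--     critical = risk = ok = 0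
--     items = (raw_result.get("items") or []) if raw_result else []
--     for x in items:
--         n = to_int(x.get("overdue_count", 0))
--         if n >= 20:
--             critical += 1
--         elif n >= 1:
--             risk += 1
--         else:
--             ok += 1
--     return {"total": len(items), "critical": critical, "risk": risk, "ok": ok}
-- ===== Notes on version B (the rewrite author's own statement) =====
-- stated objective: simpler
-- what changed: Replaces three separate filter passes over items (each calling to_int on every item) with one loop maintaining three counters, calling to_int once per item and classifying with if/elif/else; total is len(items).
import Mathlib
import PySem

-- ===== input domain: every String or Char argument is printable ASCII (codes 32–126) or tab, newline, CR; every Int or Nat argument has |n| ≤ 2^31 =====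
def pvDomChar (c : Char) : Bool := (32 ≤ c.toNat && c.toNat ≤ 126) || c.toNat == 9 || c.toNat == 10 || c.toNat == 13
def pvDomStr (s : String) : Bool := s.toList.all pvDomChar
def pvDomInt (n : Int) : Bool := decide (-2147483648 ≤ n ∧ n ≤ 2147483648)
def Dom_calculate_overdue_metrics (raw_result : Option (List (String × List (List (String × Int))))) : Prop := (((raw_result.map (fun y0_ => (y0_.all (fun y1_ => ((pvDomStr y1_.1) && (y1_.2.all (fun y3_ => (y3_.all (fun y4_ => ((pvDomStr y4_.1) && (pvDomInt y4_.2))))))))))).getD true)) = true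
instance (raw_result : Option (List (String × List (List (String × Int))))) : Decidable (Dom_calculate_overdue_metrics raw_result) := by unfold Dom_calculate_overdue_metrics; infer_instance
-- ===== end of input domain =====

-- B replaces A's three separate filter passes over items with one fold maintaining three counters (objective: simpler, one pass).


-- ===== PORT A =====
-- to_int on an Int value (the only type the convention admits here): value is not None
-- and not a str, so it returns int(float(value)) = value — exact for |value| ≤ 2^31.
def pvToInt (value : Int) : Int := value

def calculate_overdue_metrics (raw_result : Option (List (String × List (List (String × Int))))) : List (String × Int) :=
  match raw_result with
  | none => [("total", 0), ("critical", 0), ("risk", 0), ("ok", 0)]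
  | some d =>
    if d = [] then [("total", 0), ("critical", 0), ("risk", 0), ("ok", 0)]  -- 'not raw_result': empty dict is falsey
    else
      let items0 := (PySem.Dict.mk d).getD "items" []
      let items := if items0 = [] then [] else items0      -- 'or []'
      let total : Int := items.length
      let critical : Int := (items.filter (fun x => decide (pvToInt ((PySem.Dict.mk x).getD "overdue_count" 0) ≥ 20))).length
      let risk : Int := (items.filter (fun x => decide (1 ≤ pvToInt ((PySem.Dict.mk x).getD "overdue_count" 0) ∧ pvToInt ((PySem.Dict.mk x).getD "overdue_count" 0) < 20))).length
      let ok : Int := (items.filter (fun x => decide (pvToInt ((PySem.Dict.mk x).getD "overdue_count" 0) ≤ 0))).length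
      [("total", total), ("critical", critical), ("risk", risk), ("ok", ok)]

-- ===== PORT B =====
def calculate_overdue_metrics_alt (raw_result : Option (List (String × List (List (String × Int))))) : List (String × Int) :=
  let items : List (List (String × Int)) :=
    match raw_result with
    | none => []
    | some d =>
      if d = [] then []
      else match (PySem.Dict.mk d).get? "items" with   -- raw_result.get("items") or []
           | none => []
           | some i => if i = [] then [] else i
  let acc := items.foldl (fun (acc : Int × Int × Int) x =>
      let n := pvToInt ((PySem.Dict.mk x).getD "overdue_count" 0)
      if n ≥ 20 then (acc.1 + 1, acc.2.1, acc.2.2)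
      else if n ≥ 1 then (acc.1, acc.2.1 + 1, acc.2.2)
      else (acc.1, acc.2.1, acc.2.2 + 1)) (0, 0, 0)
  [("total", (items.length : Int)), ("critical", acc.1), ("risk", acc.2.1), ("ok", acc.2.2)]

-- ===== PRECONDITION & SPEC =====
def Spec_calculate_overdue_metrics (raw_result : Option (List (String × List (List (String × Int))))) (out : List (String × Int)) : Prop := out = calculate_overdue_metrics_alt raw_result
instance (raw_result : Option (List (String × List (List (String × Int))))) (out : List (String × Int)) : Decidable (Spec_calculate_overdue_metrics raw_result out) := by unfold Spec_calculate_overdue_metrics; infer_instance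

-- ===== CLAIM (what is proved, stated in full; the proofs are below) =====
def Claim_equal_calculate_overdue_metrics : Prop := ∀ (raw_result : Option (List (String × List (List (String × Int))))), Dom_calculate_overdue_metrics raw_result → Spec_calculate_overdue_metrics raw_result (calculate_overdue_metrics raw_result)

-- ===== LEMMAS AND PROOFS =====
-- One fold with three counters computes the three filter lengths of A.
theorem pv_fold_counts (items : List (List (String × Int))) (c r o : Int) :
    items.foldl (fun (acc : Int × Int × Int) x =>
      let n := pvToInt ((PySem.Dict.mk x).getD "overdue_count" 0)
      if n ≥ 20 then (acc.1 + 1, acc.2.1, acc.2.2)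
      else if n ≥ 1 then (acc.1, acc.2.1 + 1, acc.2.2)
      else (acc.1, acc.2.1, acc.2.2 + 1)) (c, r, o)
    = (c + (items.filter (fun x => decide (pvToInt ((PySem.Dict.mk x).getD "overdue_count" 0) ≥ 20))).length,
       r + (items.filter (fun x => decide (1 ≤ pvToInt ((PySem.Dict.mk x).getD "overdue_count" 0) ∧ pvToInt ((PySem.Dict.mk x).getD "overdue_count" 0) < 20))).length,
       o + (items.filter (fun x => decide (pvToInt ((PySem.Dict.mk x).getD "overdue_count" 0) ≤ 0))).length) := by
  induction items generalizing c r o with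
  | nil => simp
  | cons hd tl ih =>
    simp only [List.foldl_cons, List.filter_cons]
    by_cases h20 : pvToInt ((PySem.Dict.mk hd).getD "overdue_count" 0) ≥ 20
    · have h1 : ¬ (1 ≤ pvToInt ((PySem.Dict.mk hd).getD "overdue_count" 0) ∧ pvToInt ((PySem.Dict.mk hd).getD "overdue_count" 0) < 20) := by omega
      have h0 : ¬ pvToInt ((PySem.Dict.mk hd).getD "overdue_count" 0) ≤ 0 := by omega
      simp only [h20, h1, h0, if_pos, decide_true, decide_false]
      rw [ih]
      simp [List.length_cons]
      omega
    · by_cases h1 : pvToInt ((PySem.Dict.mk hd).getD "overdue_count" 0) ≥ 1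
      · have h12 : (1 ≤ pvToInt ((PySem.Dict.mk hd).getD "overdue_count" 0) ∧ pvToInt ((PySem.Dict.mk hd).getD "overdue_count" 0) < 20) := by omega
        have h0 : ¬ pvToInt ((PySem.Dict.mk hd).getD "overdue_count" 0) ≤ 0 := by omega
        simp only [h20, h1, h12, h0, decide_false, decide_eq_true_eq, not_false_eq_true, if_neg, if_pos]
        rw [ih]
        simp [List.length_cons]
        omega
      · have h12 : ¬ (1 ≤ pvToInt ((PySem.Dict.mk hd).getD "overdue_count" 0) ∧ pvToInt ((PySem.Dict.mk hd).getD "overdue_count" 0) < 20) := by omega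
        have h0 : pvToInt ((PySem.Dict.mk hd).getD "overdue_count" 0) ≤ 0 := by omega
        simp only [h20, h1, h0, decide_true, decide_false, decide_eq_true_eq, not_false_eq_true, if_neg, if_pos]
        rw [ih]
        simp [List.length_cons]
        omega

-- ===== VERDICT (by name: the statement is the Claim_ definition above) =====
theorem calculate_overdue_metrics_spec : Claim_equal_calculate_overdue_metrics := by
  intro raw_result _
  unfold Spec_calculate_overdue_metrics calculate_overdue_metrics calculate_overdue_metrics_alt
  match raw_result with
  | none => rfl
  | some d =>
    by_cases hd : d = []
    · simp [hd]
    · simp only [hd, if_neg, not_false_eq_true]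
      rw [PySem.Dict.getD_eq_get?_getD]
      cases h : (PySem.Dict.mk d).get? "items" with
      | none => simp
      | some i =>
        by_cases hi : i = [] <;> simp [hi, pv_fold_counts]
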